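-- pv_equiv track=rewrite | github.com/fabio-reale/aoc-solutions | 2015/python/day_05b.py | is_nice_double_pair
-- ===== SOURCE A (Python) =====
-- def is_nice_double_pair(santa_str: str) -> bool:
--     doubles: dict[tuple, int] = {}
--
--     for ind, tup in enumerate(zip(santa_str, santa_str[1:])):
--
--         seen = doubles.get(tup)
--         if seen is None:
--             doubles[tup] = ind
--         elif seen < ind - 1:
--             return True
--
--     return False
-- ===== SOURCE B (Python) =====
-- def is_nice_double_pair(santa_str: str) -> bool:
--     return any(santa_str[i:i + 2] in santa_str[i + 2:] for i in range(len(santa_str) - 1))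
-- ===== Notes on version B (the rewrite author's own statement) =====
-- stated objective: idiomatic
-- what changed: Replaced the dict of first pair-occurrences and early-return loop by a direct any() over starting positions, testing whether the 2-char slice at i occurs as a substring of the suffix starting at i+2.
import Mathlib
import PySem

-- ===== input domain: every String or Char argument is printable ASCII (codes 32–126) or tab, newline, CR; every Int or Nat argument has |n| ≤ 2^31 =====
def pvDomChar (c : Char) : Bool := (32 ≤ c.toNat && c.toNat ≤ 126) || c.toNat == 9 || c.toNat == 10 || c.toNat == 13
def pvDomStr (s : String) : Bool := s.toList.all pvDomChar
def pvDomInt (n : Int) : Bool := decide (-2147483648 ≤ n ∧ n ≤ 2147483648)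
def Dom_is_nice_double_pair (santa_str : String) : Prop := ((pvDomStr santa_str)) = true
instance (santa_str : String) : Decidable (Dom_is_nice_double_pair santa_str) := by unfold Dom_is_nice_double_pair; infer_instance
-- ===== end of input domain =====

-- B replaces A's dict of first pair-occurrences by a direct any() over start positions,
-- testing the 2-char slice at i for substring occurrence in the suffix from i+2 (idiomatic; same return value).

-- ===== PORT A =====
-- the for-loop with early return, over the enumerated zip; the dict keeps first occurrence indices
def pvLoopA (d : PySem.Dict (Char × Char) Int) : List (Int × (Char × Char)) → Bool
  | [] => false
  | (ind, tup) :: rest =>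
    match d.get? tup with
    | none => pvLoopA (d.insert tup ind) rest
    | some seen => if seen < ind - 1 then true else pvLoopA d rest

def is_nice_double_pair (santa_str : String) : Bool :=
  pvLoopA PySem.Dict.empty
    (PySem.List.enumerate
      (santa_str.toList.zip (PySem.List.slice santa_str.toList (some 1) none)) 0)

-- ===== PORT B =====
def is_nice_double_pair_alt (santa_str : String) : Bool :=
  (PySem.List.pyRange 0 (PySem.Str.len santa_str - 1) 1).any fun i =>
    PySem.Chars.isIn (PySem.List.slice santa_str.toList (some i) (some (i + 2)))
      (PySem.List.slice santa_str.toList (some (i + 2)) none)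

-- ===== PRECONDITION & SPEC =====
def Spec_is_nice_double_pair (santa_str : String) (out : Bool) : Prop := out = is_nice_double_pair_alt santa_str
instance (santa_str : String) (out : Bool) : Decidable (Spec_is_nice_double_pair santa_str out) := by unfold Spec_is_nice_double_pair; infer_instance

-- ===== CLAIM (what is proved, stated in full; the proofs are below) =====
def Claim_equal_is_nice_double_pair : Prop := ∀ (santa_str : String), Dom_is_nice_double_pair santa_str → Spec_is_nice_double_pair santa_str (is_nice_double_pair santa_str)

-- ===== LEMMAS AND PROOFS =====

-- idxOf? in a prefix is idxOf? in the whole list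
theorem pvIdxOf_take_le {t : Char × Char} {xs : List (Char × Char)} {k m : Nat}
    (h : List.idxOf? t (xs.take k) = some m) : List.idxOf? t xs = some m := by
  rw [List.idxOf?_eq_some_iff] at h ⊢
  obtain ⟨hm, hEq, hMin⟩ := h
  have hm' : m < xs.length := by simp [List.length_take] at hm; omega
  refine ⟨hm', by simpa [List.getElem_take] using hEq, ?_⟩
  intro j hj
  have hjlt : j < (xs.take k).length := by omega
  have := hMin j hj
  simpa [List.getElem_take] using this

-- the first occurrence index is at most any occurrence index
theorem pvIdxOf_le_of_getElem {t : Char × Char} {xs : List (Char × Char)} {i : Nat}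
    (h : xs[i]? = some t) : ∃ m, List.idxOf? t xs = some m ∧ m ≤ i := by
  have hi : i < xs.length := (List.getElem?_eq_some_iff.mp h).1
  have hmem : t ∈ xs := by
    have := (List.getElem?_eq_some_iff.mp h).2
    exact this ▸ List.getElem_mem _
  cases h0 : List.idxOf? t xs with
  | none => exact absurd (List.idxOf?_eq_none_iff.mp h0) (by simpa using hmem)
  | some m =>
    refine ⟨m, rfl, ?_⟩
    obtain ⟨hm, hEq, hMin⟩ := List.idxOf?_eq_some_iff.mp h0
    by_contra hlt
    have := hMin i (by omega)
    exact this ((List.getElem?_eq_some_iff.mp h).2)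

-- extending the scanned prefix past a fresh pair records index k
theorem pvIdxOf_take_succ_self {xs : List (Char × Char)} {k : Nat} (hk : k < xs.length)
    (h : List.idxOf? xs[k] (xs.take k) = none) :
    List.idxOf? xs[k] (xs.take (k + 1)) = some k := by
  rw [List.idxOf?_eq_some_iff]
  have hnm := List.idxOf?_eq_none_iff.mp h
  have hlen : (xs.take (k + 1)).length = k + 1 := by simp [List.length_take]; omega
  refine ⟨by omega, by simp [List.getElem_take], ?_⟩
  intro j hj heq
  apply hnm
  have hj' : j < (xs.take k).length := by simp [List.length_take]; omega
  have : (xs.take k)[j] = xs[k] := by simpa [List.getElem_take] using heq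
  exact this ▸ List.getElem_mem _

-- extending the scanned prefix does not change idxOf? of a different pair
theorem pvIdxOf_take_succ_ne {t : Char × Char} {xs : List (Char × Char)} {k : Nat}
    (hk : k < xs.length) (ht : t ≠ xs[k]) :
    List.idxOf? t (xs.take (k + 1)) = List.idxOf? t (xs.take k) := by
  cases h0 : List.idxOf? t (xs.take k) with
  | none =>
    rw [List.idxOf?_eq_none_iff]
    have hnm := List.idxOf?_eq_none_iff.mp h0
    intro hmem
    obtain ⟨i, hi, hEq⟩ := List.mem_iff_getElem.mp hmem
    have hi' : i < k + 1 ∧ i < xs.length := by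
      simp [List.length_take] at hi; omega
    by_cases hik : i < k
    · apply hnm
      have : (xs.take k)[i]'(by simp [List.length_take]; omega) = t := by
        simpa [List.getElem_take] using hEq
      exact this ▸ List.getElem_mem _
    · have : i = k := by omega
      subst this
      exact ht (by simpa [List.getElem_take] using hEq.symm)
  | some m =>
    rw [List.idxOf?_eq_some_iff] at h0 ⊢
    obtain ⟨hm, hEq, hMin⟩ := h0
    have hm' : m < (xs.take k).length := hm
    simp [List.length_take] at hm'
    refine ⟨by simp [List.length_take]; omega, ?_, ?_⟩
    · simpa [List.getElem_take] using (by simpa [List.getElem_take] using hEq : xs[m] = t)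
    · intro j hj
      have := hMin j hj
      simpa [List.getElem_take] using this

-- an already-recorded pair keeps its idxOf? when the prefix grows
theorem pvIdxOf_take_succ_mem {t : Char × Char} {xs : List (Char × Char)} {k m : Nat}
    (h : List.idxOf? t (xs.take k) = some m) :
    List.idxOf? t (xs.take (k + 1)) = some m := by
  rw [List.idxOf?_eq_some_iff] at h ⊢
  obtain ⟨hm, hEq, hMin⟩ := h
  have hm' : m < (xs.take k).length := hm
  simp [List.length_take] at hm'
  refine ⟨by simp [List.length_take]; omega, ?_, ?_⟩
  · simpa [List.getElem_take] using (by simpa [List.getElem_take] using hEq : xs[m] = t)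
  · intro j hj
    have := hMin j hj
    simpa [List.getElem_take] using this

-- characterisation of A's loop: it returns true iff some pair at position j repeats a pair
-- first seen at least two positions earlier
theorem pvLoopA_iff (pairs : List (Char × Char)) :
    ∀ (fuel k : Nat) (d : PySem.Dict (Char × Char) Int),
      pairs.length ≤ k + fuel →
      (∀ t, d.get? t = Option.map (fun m : Nat => (m : Int)) (List.idxOf? t (pairs.take k))) →
      (pvLoopA d (PySem.List.enumerate (pairs.drop k) (k : Int)) = true ↔
        ∃ j m t, k ≤ j ∧ pairs[j]? = some t ∧ List.idxOf? t pairs = some m ∧ m + 2 ≤ j) := by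
  intro fuel
  induction fuel with
  | zero =>
    intro k d hlen hd
    rw [List.drop_eq_nil_of_le (by omega), PySem.List.enumerate_nil]
    show (false = true) ↔ _
    simp only [Bool.false_eq_true, false_iff]
    rintro ⟨j, m, t, hj, hget, -, -⟩
    obtain ⟨hlt, -⟩ := List.getElem?_eq_some_iff.mp hget
    omega
  | succ fuel ih =>
    intro k d hlen hd
    by_cases hk : k < pairs.length
    · rw [List.drop_eq_getElem_cons hk, PySem.List.enumerate_cons]
      have hdk := hd pairs[k]
      cases h0 : List.idxOf? pairs[k] (pairs.take k) with
      | none =>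
        rw [h0, Option.map_none] at hdk
        have hstep : pvLoopA d (((k : Int), pairs[k]) :: PySem.List.enumerate (pairs.drop (k+1)) ((k : Int) + 1)) =
            pvLoopA (d.insert pairs[k] (k : Int)) (PySem.List.enumerate (pairs.drop (k+1)) ((k : Int) + 1)) := by
          simp [pvLoopA, hdk]
        have hinv : ∀ t, (d.insert pairs[k] (k : Int)).get? t =
            Option.map (fun m : Nat => (m : Int)) (List.idxOf? t (pairs.take (k + 1))) := by
          intro t
          by_cases ht : t = pairs[k]
          · subst ht
            rw [PySem.Dict.get?_insert_self d _ _, pvIdxOf_take_succ_self hk h0]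
            rfl
          · rw [PySem.Dict.get?_insert_of_ne d _ ht, pvIdxOf_take_succ_ne hk ht]
            exact hd t
        have hcast : ((k : Int) + 1) = ((k + 1 : Nat) : Int) := by push_cast; ring
        rw [hstep, hcast, ih (k + 1) _ (by omega) hinv]
        constructor
        · rintro ⟨j, m, t, hkj, h1, h2, h3⟩
          exact ⟨j, m, t, by omega, h1, h2, h3⟩
        · rintro ⟨j, m, t, hkj, h1, h2, h3⟩
          rcases Nat.eq_or_lt_of_le hkj with rfl | hlt
          · -- j = k: t = pairs[k], but pairs[k] is fresh, so its first index is ≥ k; contradiction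
            obtain ⟨hj1, hEq1⟩ := List.getElem?_eq_some_iff.mp h1
            subst hEq1
            obtain ⟨hm, hEq, -⟩ := List.idxOf?_eq_some_iff.mp h2
            have hnm := List.idxOf?_eq_none_iff.mp h0
            exfalso
            apply hnm
            have : (pairs.take k)[m]'(by simp [List.length_take]; omega) = pairs[k] := by
              simpa [List.getElem_take] using hEq
            exact this ▸ List.getElem_mem _
          · exact ⟨j, m, t, by omega, h1, h2, h3⟩
      | some m =>
        rw [h0, Option.map_some] at hdk
        have hfirst : List.idxOf? pairs[k] pairs = some m := pvIdxOf_take_le h0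
        by_cases hlt : m + 2 ≤ k
        · have hcond : ((m : Int) < (k : Int) - 1) := by omega
          have hstep : pvLoopA d (((k : Int), pairs[k]) :: PySem.List.enumerate (pairs.drop (k+1)) ((k : Int) + 1)) = true := by
            simp [pvLoopA, hdk, hcond]
          rw [hstep]
          simp only [true_iff]
          exact ⟨k, m, pairs[k], le_refl _, List.getElem?_eq_getElem hk, hfirst, hlt⟩
        · have hcond : ¬ ((m : Int) < (k : Int) - 1) := by omega
          have hstep : pvLoopA d (((k : Int), pairs[k]) :: PySem.List.enumerate (pairs.drop (k+1)) ((k : Int) + 1)) =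
              pvLoopA d (PySem.List.enumerate (pairs.drop (k+1)) ((k : Int) + 1)) := by
            simp [pvLoopA, hdk, hcond]
          have hinv : ∀ t, d.get? t =
              Option.map (fun m : Nat => (m : Int)) (List.idxOf? t (pairs.take (k + 1))) := by
            intro t
            by_cases ht : t = pairs[k]
            · subst ht
              rw [pvIdxOf_take_succ_mem h0, hdk]
              rfl
            · rw [pvIdxOf_take_succ_ne hk ht]
              exact hd t
          have hcast : ((k : Int) + 1) = ((k + 1 : Nat) : Int) := by push_cast; ring
          rw [hstep, hcast, ih (k + 1) _ (by omega) hinv]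
          constructor
          · rintro ⟨j, m', t, hkj, h1, h2, h3⟩
            exact ⟨j, m', t, by omega, h1, h2, h3⟩
          · rintro ⟨j, m', t, hkj, h1, h2, h3⟩
            rcases Nat.eq_or_lt_of_le hkj with rfl | hl
            · obtain ⟨hj1, hEq1⟩ := List.getElem?_eq_some_iff.mp h1
              subst hEq1
              rw [hfirst] at h2
              cases h2
              omega
            · exact ⟨j, m', t, by omega, h1, h2, h3⟩
    · rw [List.drop_eq_nil_of_le (by omega), PySem.List.enumerate_nil]
      show (false = true) ↔ _
      simp only [Bool.false_eq_true, false_iff]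
      rintro ⟨j, m, t, hj, hget, -, -⟩
      obtain ⟨hlt, -⟩ := List.getElem?_eq_some_iff.mp hget
      omega

-- [a, b] is a prefix of ys iff ys starts with a then b
theorem pvPairPrefix {a b : Char} {ys : List Char} :
    [a, b] <+: ys ↔ ys[0]? = some a ∧ ys[1]? = some b := by
  cases ys with
  | nil => simp
  | cons y ys' =>
    cases ys' with
    | nil => simp [List.cons_prefix_cons]
    | cons z zs => simp [List.cons_prefix_cons, eq_comm]

-- B's per-position test: the slice [l[k], l[k+1]] occurs in the suffix from k+2
theorem pvCond_iff (l : List Char) (k : Nat) (hk : k + 1 < l.length) :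
    (PySem.Chars.isIn (PySem.List.slice l (some (k : Int)) (some ((k : Int) + 2)))
      (PySem.List.slice l (some ((k : Int) + 2)) none) = true) ↔
    ∃ j, k + 2 ≤ j ∧ l[j]? = some (l[k]'(by omega)) ∧ l[j+1]? = some (l[k+1]'hk) := by
  have e2 : ((k : Int) + 2) = ((k : Int) + ((2 : Nat) : Int)) := by norm_num
  rw [e2, PySem.List.slice_natCast_add, PySem.List.slice_from _ (by positivity)]
  have e3 : ((k : Int) + ((2 : Nat) : Int)).toNat = k + 2 := by omega
  rw [e3]
  have hd1 : List.drop k l = l[k]'(by omega) :: l[k+1]'hk :: List.drop (k+2) l := by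
    rw [List.drop_eq_getElem_cons (by omega : k < l.length),
        List.drop_eq_getElem_cons (by omega : k + 1 < l.length)]
  have htake : ∀ (x y : Char) (rest : List Char), List.take 2 (x :: y :: rest) = [x, y] :=
    fun _ _ _ => rfl
  rw [hd1, htake, ← PySem.Chars.exists_prefix_drop_iff_isIn]
  constructor
  · rintro ⟨j, hpre⟩
    rw [List.drop_drop, pvPairPrefix] at hpre
    obtain ⟨h1, h2⟩ := hpre
    simp only [List.getElem?_drop, Nat.add_zero] at h1 h2
    exact ⟨k + 2 + j, by omega, h1, h2⟩
  · rintro ⟨j, hj, h1, h2⟩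
    refine ⟨j - (k + 2), ?_⟩
    rw [List.drop_drop, show k + 2 + (j - (k + 2)) = j by omega, pvPairPrefix]
    refine ⟨by simpa using h1, by simpa using h2⟩

-- characterisation of B: true iff a pair repeats with a gap of at least 2
theorem pvAlt_iff (s : String) :
    (is_nice_double_pair_alt s = true ↔
      ∃ k j t, k + 2 ≤ j ∧ (s.toList.zip s.toList.tail)[k]? = some t ∧
        (s.toList.zip s.toList.tail)[j]? = some t) := by
  unfold is_nice_double_pair_alt
  rw [List.any_eq_true]
  simp only [PySem.Str.len_eq]
  constructor
  · rintro ⟨i, hiMem, hcond⟩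
    rw [PySem.List.mem_pyRange_one] at hiMem
    obtain ⟨hi0, hiU⟩ := hiMem
    obtain ⟨k, rfl⟩ : ∃ k : Nat, i = (k : Int) := ⟨i.toNat, (Int.toNat_of_nonneg hi0).symm⟩
    have hk1 : k + 1 < s.toList.length := by omega
    obtain ⟨j, hj, h1, h2⟩ := (pvCond_iff s.toList k hk1).mp hcond
    refine ⟨k, j, (s.toList[k]'(by omega), s.toList[k+1]'hk1), hj, ?_, ?_⟩
    · rw [List.getElem?_zip_eq_some]
      exact ⟨List.getElem?_eq_getElem (by omega),
        by rw [List.getElem?_tail]; exact List.getElem?_eq_getElem hk1⟩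
    · rw [List.getElem?_zip_eq_some]
      exact ⟨h1, by rw [List.getElem?_tail]; exact h2⟩
  · rintro ⟨k, j, t, hkj, hpk, hpj⟩
    rw [List.getElem?_zip_eq_some] at hpk hpj
    obtain ⟨ha, hb⟩ := hpk
    obtain ⟨hc, hd⟩ := hpj
    rw [List.getElem?_tail] at hb hd
    have hk1 : k + 1 < s.toList.length := (List.getElem?_eq_some_iff.mp hb).1
    refine ⟨(k : Int), ?_, ?_⟩
    · rw [PySem.List.mem_pyRange_one]
      exact ⟨by omega, by omega⟩
    · apply (pvCond_iff s.toList k hk1).mpr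
      have hEqa : s.toList[k]'(by omega) = t.1 := (List.getElem?_eq_some_iff.mp ha).2
      have hEqb : s.toList[k+1]'hk1 = t.2 := (List.getElem?_eq_some_iff.mp hb).2
      exact ⟨j, hkj, by rw [hEqa]; exact hc, by rw [hEqb]; exact hd⟩

-- A's existence form and B's existence form coincide
theorem pvForms_iff (pairs : List (Char × Char)) :
    ((∃ j m t, 0 ≤ j ∧ pairs[j]? = some t ∧ List.idxOf? t pairs = some m ∧ m + 2 ≤ j) ↔
      ∃ k j t, k + 2 ≤ j ∧ pairs[k]? = some t ∧ pairs[j]? = some t) := by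
  constructor
  · rintro ⟨j, m, t, _, h1, h2, h3⟩
    obtain ⟨hm, hEq, _⟩ := List.idxOf?_eq_some_iff.mp h2
    exact ⟨m, j, t, h3, by rw [List.getElem?_eq_getElem hm, hEq], h1⟩
  · rintro ⟨k, j, t, hkj, h1, h2⟩
    obtain ⟨m, hm, hle⟩ := pvIdxOf_le_of_getElem h1
    exact ⟨j, m, t, by omega, h2, hm, by omega⟩

-- ===== VERDICT (by name: the statement is the Claim_ definition above) =====
theorem is_nice_double_pair_spec : Claim_equal_is_nice_double_pair := by
  intro s _
  unfold Spec_is_nice_double_pair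
  rw [Bool.eq_iff_iff]
  have hA : is_nice_double_pair s = true ↔
      ∃ j m t, 0 ≤ j ∧ (s.toList.zip s.toList.tail)[j]? = some t ∧
        List.idxOf? t (s.toList.zip s.toList.tail) = some m ∧ m + 2 ≤ j := by
    unfold is_nice_double_pair
    rw [PySem.List.slice_from_one]
    have := pvLoopA_iff (s.toList.zip s.toList.tail)
      (s.toList.zip s.toList.tail).length 0 PySem.Dict.empty (by omega)
      (by intro t; simp)
    simpa using this
  rw [hA, pvAlt_iff, pvForms_iff]
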